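-- pv_equiv track=rewrite | github.com/alex-bo/leetcode | Candy - LeetCode.py | get_candies
-- ===== SOURCE A (Python) =====
-- from typing import List
--
-- def get_candies(ratings: List[int]) -> List[int]:
--     candies = [1 for _ in ratings]
--     prev_r = None
--     for i, r in enumerate(ratings):
--         if i > 0 and r > prev_r:
--             candies[i] = candies[i - 1] + 1
--         prev_r = r
--     return candies
-- ===== SOURCE B (Python) =====
-- from typing import List
--
-- def get_candies(ratings: List[int]) -> List[int]:
--     # Stage 1: segment ratings into maximal strictly increasing runs.
--     runs = []
--     for r in ratings:
--         if runs and r > runs[-1][-1]: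
--             runs[-1].append(r)
--         else:
--             runs.append([r])
--     # Stage 2: each run of length k contributes the ramp 1..k.
--     out = []
--     for run in runs:
--         out.extend(range(1, len(run) + 1))
--     return out
-- ===== Notes on version B (the rewrite author's own statement) =====
-- stated objective: alternative
-- what changed: Replaces the single pass with per-element count updates by a two-stage algorithm: first segment the ratings into maximal strictly increasing runs, then emit the ramp 1..len(run) for each run via range().
import Mathlib
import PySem

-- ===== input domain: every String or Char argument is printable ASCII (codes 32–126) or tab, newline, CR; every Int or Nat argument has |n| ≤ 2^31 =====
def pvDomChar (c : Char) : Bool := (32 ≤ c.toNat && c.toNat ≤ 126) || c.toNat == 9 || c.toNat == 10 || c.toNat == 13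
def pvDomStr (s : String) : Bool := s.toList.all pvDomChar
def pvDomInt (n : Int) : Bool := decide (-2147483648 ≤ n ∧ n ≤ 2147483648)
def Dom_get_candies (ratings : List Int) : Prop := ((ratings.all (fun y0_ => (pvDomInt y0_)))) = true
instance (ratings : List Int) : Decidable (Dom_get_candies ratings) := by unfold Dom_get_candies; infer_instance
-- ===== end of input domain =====

-- B replaces A's per-element count updates by a two-stage algorithm (segment into maximal strictly
-- increasing runs, then emit the ramp 1..len(run) for each run); return values proved equal.

-- ===== PORT A =====
-- helper: Python's enumerate(ratings) starting at index n
def pvEnum (n : Nat) : List Int → List (Nat × Int)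
  | [] => []
  | r :: rs => (n, r) :: pvEnum (n + 1) rs

-- the for-loop: state is (candies, prev_r); candies[i-1] is in range whenever read (i > 0), so getD is exact
def pvALoop : List (Nat × Int) → List Int → Option Int → List Int
  | [], candies, _ => candies
  | (i, r) :: rest, candies, prev_r =>
      let candies :=
        if i > 0 && (match prev_r with | some pr => decide (r > pr) | none => false) then
          candies.set i (candies.getD (i - 1) 0 + 1)
        else candies
      pvALoop rest candies (some r)

def get_candies (ratings : List Int) : List Int :=
  pvALoop (pvEnum 0 ratings) (ratings.map (fun _ => (1 : Int))) none

-- ===== PORT B =====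
-- stage 1 loop of Source B: 'runs[-1][-1]' is read via getLast?; runs never contains an empty run,
-- so the inner 'none' branch is unreachable (it mirrors the boolean 'runs and …' guard)
def pvSplit : List Int → List (List Int) → List (List Int)
  | [], runs => runs
  | r :: rest, runs =>
      let runs :=
        match runs.getLast? with
        | some run =>
          match run.getLast? with
          | some x => if r > x then runs.dropLast ++ [run ++ [r]] else runs ++ [[r]]
          | none => runs ++ [[r]]
        | none => runs ++ [[r]]
      pvSplit rest runs

def get_candies_alt (ratings : List Int) : List Int :=
  (pvSplit ratings []).foldl (fun out run => out ++ PySem.List.pyRange 1 (run.length + 1) 1) []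

-- ===== PRECONDITION & SPEC =====
def Spec_get_candies (ratings : List Int) (out : List Int) : Prop := out = get_candies_alt ratings
instance (ratings : List Int) (out : List Int) : Decidable (Spec_get_candies ratings out) := by unfold Spec_get_candies; infer_instance

-- ===== CLAIM (what is proved, stated in full; the proofs are below) =====
def Claim_equal_get_candies : Prop := ∀ (ratings : List Int), Dom_get_candies ratings → Spec_get_candies ratings (get_candies ratings)

-- ===== LEMMAS AND PROOFS =====

-- reference recursion both ports are reduced to: the running count within a strictly increasing run
def pvRuns (prev : Option (Int × Int)) : List Int → List Int
  | [] => []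
  | r :: rs =>
      let c := match prev with
        | some (pr, pc) => if r > pr then pc + 1 else 1
        | none => 1
      c :: pvRuns (some (r, c)) rs

-- the ramp a run contributes: range(1, len(run)+1)
def pvRamp (run : List Int) : List Int := PySem.List.pyRange 1 (run.length + 1) 1

theorem ramp_snoc (run : List Int) (r : Int) :
    pvRamp (run ++ [r]) = pvRamp run ++ [(run.length : Int) + 1] := by
  unfold pvRamp
  have h := PySem.List.pyRange_one_succ_right (a := 1) (b := (run.length : Int) + 1) (by omega)
  simp only [List.length_append, List.length_cons, List.length_nil]
  push_cast
  rw [show (run.length : Int) + 1 + 1 = ((run.length : Int) + 1) + 1 from by ring, h]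

theorem split_eq (rs : List Int) : ∀ (pre : List (List Int)) (cur : List Int) (x : Int),
    cur ≠ [] → cur.getLast? = some x →
    (pvSplit rs (pre ++ [cur])).flatMap pvRamp
      = pre.flatMap pvRamp ++ pvRamp cur ++ pvRuns (some (x, (cur.length : Int))) rs := by
  induction rs with
  | nil => intro pre cur x _ _; simp [pvSplit, pvRuns]
  | cons r rest ih =>
      intro pre cur x hne hlast
      simp only [pvSplit, List.getLast?_append, List.getLast?_singleton, Option.some_or,
        List.dropLast_concat]
      rw [hlast]
      dsimp only
      by_cases hr : r > x
      · rw [if_pos hr]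
        rw [ih pre (cur ++ [r]) r (by simp) (by simp)]
        rw [ramp_snoc]
        simp only [pvRuns, List.length_append, List.length_cons, List.length_nil]
        rw [if_pos hr]
        push_cast
        simp [List.append_assoc]
      · rw [if_neg hr]
        rw [ih (pre ++ [cur]) [r] r (by simp) (by simp)]
        simp only [pvRuns]
        rw [if_neg hr]
        have h12 : PySem.List.pyRange 1 2 1 = [(1 : Int)] := by decide
        simp [pvRamp, h12, List.append_assoc]

theorem b_eq_runs (ratings : List Int) : get_candies_alt ratings = pvRuns none ratings := by
  unfold get_candies_alt
  rw [PySem.List.foldl_append_eq_flatMap]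
  cases ratings with
  | nil => rfl
  | cons r rs =>
      simp only [pvSplit, List.getLast?_nil, List.nil_append]
      have hflat : ∀ l : List (List Int),
          l.flatMap (fun run => PySem.List.pyRange 1 ((run.length : Int) + 1) 1) = l.flatMap pvRamp := by
        intro l; rfl
      have h := split_eq rs [] [r] r (by simp) (by simp)
      simp only [List.nil_append] at h
      rw [hflat, h]
      simp only [pvRamp, pvRuns, List.length_cons, List.length_nil, List.flatMap_nil,
        List.nil_append, Nat.zero_add, Nat.cast_one]
      have h12 : PySem.List.pyRange 1 2 1 = [(1 : Int)] := by decide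
      simp [h12]

theorem aloop_eq (rs : List Int) : ∀ (pref : List Int) (pr pc : Int),
    pref ≠ [] → pref.getLast? = some pc →
    pvALoop (pvEnum pref.length rs) (pref ++ rs.map (fun _ => (1 : Int))) (some pr)
      = pref ++ pvRuns (some (pr, pc)) rs := by
  induction rs with
  | nil => intro pref pr pc _ _; simp [pvEnum, pvALoop, pvRuns]
  | cons r rs ih =>
      intro pref pr pc hne hlast
      have hpos : 0 < pref.length := List.length_pos_iff.mpr hne
      simp only [pvEnum, List.map_cons, pvALoop, pvRuns]
      by_cases hr : r > pr
      · have hcond : (decide (pref.length > 0) && decide (r > pr)) = true := by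
          simp [hr, hpos]
        rw [if_pos hcond]
        have hlastc : pref.getLast hne = pc := by
          rw [List.getLast?_eq_some_getLast (l := pref) hne] at hlast
          exact Option.some.inj hlast
        have hget : (pref ++ (1 : Int) :: rs.map (fun _ => (1 : Int))).getD (pref.length - 1) 0 = pc := by
          rw [List.getD_append _ _ _ _ (by omega)]
          rw [List.getD_eq_getElem _ _ (by omega)]
          rw [← List.getLast_eq_getElem (l := pref) (h := hne)]
          exact hlastc
        have hset : (pref ++ (1 : Int) :: rs.map (fun _ => (1 : Int))).set pref.length (pc + 1)
            = (pref ++ [pc + 1]) ++ rs.map (fun _ => (1 : Int)) := by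
          rw [show pref.length = pref.length + 0 from rfl, List.set_append_right _ _ (by omega)]
          simp
        rw [hget, hset]
        have hih := ih (pref ++ [pc + 1]) r (pc + 1) (by simp) (by simp)
        simp only [List.length_append, List.length_cons, List.length_nil] at hih ⊢
        rw [show pref.length + 1 = pref.length + (0 + 1) from by omega, hih]
        simp [hr]
      · have hcond : (decide (pref.length > 0) && decide (r > pr)) = false := by
          simp [hr]
        rw [if_neg (by simp [hcond])]
        have heq : pref ++ (1 : Int) :: rs.map (fun _ => (1 : Int))
            = (pref ++ [(1 : Int)]) ++ rs.map (fun _ => (1 : Int)) := by simp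
        rw [heq]
        have hih := ih (pref ++ [(1 : Int)]) r 1 (by simp) (by simp)
        simp only [List.length_append, List.length_cons, List.length_nil] at hih ⊢
        rw [show pref.length + 1 = pref.length + (0 + 1) from by omega, hih]
        simp [hr]

theorem a_eq_runs (ratings : List Int) : get_candies ratings = pvRuns none ratings := by
  cases ratings with
  | nil => simp [get_candies, pvEnum, pvALoop, pvRuns]
  | cons r rs =>
      simp only [get_candies, pvEnum, List.map_cons, pvALoop, pvRuns]
      rw [if_neg (by simp)]
      have heq : (1 : Int) :: rs.map (fun _ => (1 : Int)) = [(1 : Int)] ++ rs.map (fun _ => (1 : Int)) := by simp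
      rw [heq]
      have hih := aloop_eq rs [(1 : Int)] r 1 (by simp) (by simp)
      simpa using hih

-- ===== VERDICT (by name: the statement is the Claim_ definition above) =====
theorem get_candies_spec : Claim_equal_get_candies := by
  intro ratings _
  unfold Spec_get_candies
  rw [a_eq_runs, b_eq_runs]
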